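-- pv_equiv track=rewrite | github.com/jpn--/larch | larch/util/data_expansion.py | piecewise_linear_data_names
-- ===== SOURCE A (Python) =====
-- def piecewise_linear_data_names(basename, breaks):
-- 	# first leg
-- 	b = breaks[0]
-- 	z = [f"piece({basename},None,{b})"]
-- 	# middle legs
-- 	for i in range(len(breaks) - 1):
-- 		b0 = breaks[i]
-- 		b1 = breaks[i + 1]
-- 		z += [f"piece({basename},{b0},{b1})"]
-- 	# last leg
-- 	i = len(breaks) - 1
-- 	b0 = breaks[i]
-- 	z += [f"piece({basename},{b0},None)"]
-- 	return z
-- ===== SOURCE B (Python) =====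
-- def piecewise_linear_data_names(basename, breaks):
--     bounds = [None] + list(breaks) + [None]
--     return [f"piece({basename},{lo},{hi})" for lo, hi in zip(bounds, bounds[1:])]
-- ===== Notes on version B (the rewrite author's own statement) =====
-- stated objective: idiomatic
-- what changed: Replaces A's three separate blocks (first leg, indexed middle loop, last leg) with one uniform sliding-window pass over a None-padded bounds list.
import Mathlib
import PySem

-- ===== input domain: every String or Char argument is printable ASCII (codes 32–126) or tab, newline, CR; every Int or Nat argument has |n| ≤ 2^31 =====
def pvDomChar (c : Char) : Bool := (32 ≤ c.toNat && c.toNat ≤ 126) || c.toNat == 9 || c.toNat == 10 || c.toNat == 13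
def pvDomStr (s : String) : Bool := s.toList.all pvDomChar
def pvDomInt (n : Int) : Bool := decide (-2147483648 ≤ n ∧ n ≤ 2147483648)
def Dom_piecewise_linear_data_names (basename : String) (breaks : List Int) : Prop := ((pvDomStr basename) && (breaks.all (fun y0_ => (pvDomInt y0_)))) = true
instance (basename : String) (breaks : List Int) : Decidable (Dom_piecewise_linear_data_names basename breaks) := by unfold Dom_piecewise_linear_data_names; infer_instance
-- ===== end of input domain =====

-- B replaces A's three blocks (first leg, indexed middle loop, last leg) with one
-- uniform sliding-window pass over a None-padded bounds list (objective: idiomatic).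

-- ===== PORT A =====
def piecewise_linear_data_names (basename : String) (breaks : List Int) : List String :=
  -- b = breaks[0]: raises IndexError on empty breaks (excluded by Pre_)
  match PySem.List.pyGet? breaks 0 with
  | none => []
  | some b =>
    let z : List String := ["piece(" ++ basename ++ ",None," ++ PySem.Int.toStr b ++ ")"]
    -- middle legs; indices i and i+1 are always in range here (0 ≤ i < len-1),
    -- so pyGetD with a dummy default is exact
    let z := (PySem.List.pyRange 0 ((breaks.length : Int) - 1) 1).foldl
      (fun z i =>
        let b0 := PySem.List.pyGetD breaks i 0
        let b1 := PySem.List.pyGetD breaks (i + 1) 0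
        z ++ ["piece(" ++ basename ++ "," ++ PySem.Int.toStr b0 ++ "," ++ PySem.Int.toStr b1 ++ ")"]) z
    -- last leg; index len-1 in range since breaks ≠ [] here
    let b0 := PySem.List.pyGetD breaks ((breaks.length : Int) - 1) 0
    z ++ ["piece(" ++ basename ++ "," ++ PySem.Int.toStr b0 ++ ",None)"]

-- ===== PORT B =====
-- f-string rendering of an Optional[int] bound: None → "None", n → str(n)
def pvOptStr (x : Option Int) : String :=
  match x with
  | none => "None"
  | some v => PySem.Int.toStr v

def piecewise_linear_data_names_alt (basename : String) (breaks : List Int) : List String :=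
  let bounds : List (Option Int) := [none] ++ breaks.map some ++ [none]
  (bounds.zip (PySem.List.slice bounds (some 1) none)).map
    (fun p => "piece(" ++ basename ++ "," ++ pvOptStr p.1 ++ "," ++ pvOptStr p.2 ++ ")")

-- ===== PRECONDITION & SPEC =====
-- Pre_ excludes only empty breaks, on which A raises IndexError (breaks[0]).
def Pre_piecewise_linear_data_names (basename : String) (breaks : List Int) : Prop := breaks ≠ []
instance (basename : String) (breaks : List Int) : Decidable (Pre_piecewise_linear_data_names basename breaks) := by unfold Pre_piecewise_linear_data_names; infer_instance

def pvWitness_piecewise_linear_data_names : String × List Int := ("x", [1, 3])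

def Spec_piecewise_linear_data_names (basename : String) (breaks : List Int) (out : List String) : Prop := out = piecewise_linear_data_names_alt basename breaks
instance (basename : String) (breaks : List Int) (out : List String) : Decidable (Spec_piecewise_linear_data_names basename breaks out) := by unfold Spec_piecewise_linear_data_names; infer_instance

-- ===== CLAIM (what is proved, stated in full; the proofs are below) =====
def Claim_equal_piecewise_linear_data_names : Prop := ∀ (basename : String) (breaks : List Int), Dom_piecewise_linear_data_names basename breaks → Pre_piecewise_linear_data_names basename breaks → Spec_piecewise_linear_data_names basename breaks (piecewise_linear_data_names basename breaks)

-- ===== LEMMAS AND PROOFS =====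

-- A's middle loop over range(len-1), with a cons'ed list, as a map over List.range
theorem pv_mid_eq (g : Int → Int → String) :
    ∀ (bs : List Int) (b : Int),
      (List.range bs.length).map
        (fun k => g ((b :: bs).getD k 0) ((b :: bs).getD (k + 1) 0))
      = ((b :: bs).zip bs).map (fun p => g p.1 p.2) := by
  intro bs
  induction bs with
  | nil => intro b; rfl
  | cons c rest ih =>
    intro b
    have h := ih c
    simp only [List.length_cons, List.range_succ_eq_map, List.map_cons, List.map_map]
    simp only [List.getD_cons_zero, List.getD_cons_succ, List.zip_cons_cons, List.map_cons]
    congr 1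

-- B's sliding window over the some-mapped, none-terminated tail
theorem pv_zipB (g : Option Int → Option Int → String) :
    ∀ (bs : List Int) (b : Int),
      ((((b :: bs).map some ++ [none]).zip ((bs.map some ++ [none]))).map
          (fun p : Option Int × Option Int => g p.1 p.2))
      = ((b :: bs).zip bs).map (fun p => g (some p.1) (some p.2))
        ++ [g (some ((b :: bs).getD bs.length 0)) none] := by
  intro bs
  induction bs with
  | nil => intro b; rfl
  | cons c rest ih =>
    intro b
    have h := ih c
    simp only [List.map_cons, List.cons_append, List.zip_cons_cons, List.map_cons] at h ⊢
    simp only [List.length_cons, List.getD_cons_succ]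
    congr 1

-- ===== VERDICT (by name: the statement is the Claim_ definition above) =====
theorem piecewise_linear_data_names_spec : Claim_equal_piecewise_linear_data_names := by
  intro basename breaks _ hpre
  unfold Spec_piecewise_linear_data_names
  obtain ⟨b, bs, rfl⟩ := List.exists_cons_of_ne_nil hpre
  unfold piecewise_linear_data_names piecewise_linear_data_names_alt
  have hget : PySem.List.pyGet? (b :: bs) 0 = some b := by
    simp [PySem.List.pyGet?, PySem.List.pyIdx?]
  simp only [hget, PySem.List.slice_from_one, List.length_cons]
  have hn : ((bs.length + 1 : Nat) : Int) - 1 = ((bs.length : Nat) : Int) := by push_cast; ring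
  rw [hn, PySem.List.foldl_append_singleton_eq_map, PySem.List.pyRange_zero_natCast, List.map_map]
  have hmid : (List.range bs.length).map
      ((fun i => "piece(" ++ basename ++ "," ++ PySem.Int.toStr (PySem.List.pyGetD (b :: bs) i 0) ++ "," ++
          PySem.Int.toStr (PySem.List.pyGetD (b :: bs) (i + 1) 0) ++ ")") ∘ (fun k : Nat => (k : Int)))
      = (List.range bs.length).map (fun k =>
          (fun b0 b1 => "piece(" ++ basename ++ "," ++ PySem.Int.toStr b0 ++ "," ++
            PySem.Int.toStr b1 ++ ")") ((b :: bs).getD k 0) ((b :: bs).getD (k + 1) 0)) := by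
    refine List.map_congr_left ?_
    intro k _
    simp only [Function.comp]
    have h1 : ((k : Int) + 1) = ((k + 1 : Nat) : Int) := by push_cast; ring
    simp only [h1, PySem.List.pyGetD_natCast]
  rw [hmid, pv_mid_eq (fun b0 b1 => "piece(" ++ basename ++ "," ++ PySem.Int.toStr b0 ++ "," ++
      PySem.Int.toStr b1 ++ ")") bs b]
  simp only [List.map_cons, List.cons_append, List.nil_append, List.tail_cons, List.zip_cons_cons,
    List.map_cons]
  have hform : (some b :: (List.map some bs ++ [none])) = (b :: bs).map some ++ [none] := by simp
  rw [hform,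
    pv_zipB (fun o1 o2 => "piece(" ++ basename ++ "," ++ pvOptStr o1 ++ "," ++ pvOptStr o2 ++ ")") bs b]
  simp only [pvOptStr, PySem.List.pyGetD_natCast]
  have h1 : "piece(" ++ basename ++ ",None," ++ PySem.Int.toStr b ++ ")"
      = "piece(" ++ basename ++ "," ++ "None" ++ "," ++ PySem.Int.toStr b ++ ")" := by
    simp [pysem, String.append_assoc]
  have h2 : "piece(" ++ basename ++ "," ++ PySem.Int.toStr ((b :: bs).getD bs.length 0) ++ ",None)"
      = "piece(" ++ basename ++ "," ++ PySem.Int.toStr ((b :: bs).getD bs.length 0) ++ "," ++ "None" ++ ")" := by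
    simp [pysem, String.append_assoc]
  rw [h1, h2]
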